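-- pv_equiv track=rewrite | github.com/lineville/daily-coding-problem | python/2020/september/sep-10/main.py | flipsNeeded
-- ===== SOURCE A (Python) =====
-- def flipsNeeded(x_and_ys: str) -> int:
--     x = 0
--     y = len(x_and_ys) - 1
--     flips = 0
--
--     while x < y:
--         if x_and_ys[x] == 'y':
--             flips += 1
--         if x_and_ys[y] == 'x':
--             flips += 1
--         x += 1
--         y -= 1
--     return flips
-- ===== SOURCE B (Python) =====
-- def flipsNeeded(x_and_ys: str) -> int:
--     n = len(x_and_ys)
--     return x_and_ys[:n // 2].count('y') + x_and_ys[(n + 1) // 2:].count('x')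
-- ===== Notes on version B (the rewrite author's own statement) =====
-- stated objective: simpler
-- what changed: Replaces the interleaved two-pointer while loop with a closed-form split: count 'y' in the left half slice and 'x' in the right half slice, excluding the middle character on odd lengths.
import Mathlib
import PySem

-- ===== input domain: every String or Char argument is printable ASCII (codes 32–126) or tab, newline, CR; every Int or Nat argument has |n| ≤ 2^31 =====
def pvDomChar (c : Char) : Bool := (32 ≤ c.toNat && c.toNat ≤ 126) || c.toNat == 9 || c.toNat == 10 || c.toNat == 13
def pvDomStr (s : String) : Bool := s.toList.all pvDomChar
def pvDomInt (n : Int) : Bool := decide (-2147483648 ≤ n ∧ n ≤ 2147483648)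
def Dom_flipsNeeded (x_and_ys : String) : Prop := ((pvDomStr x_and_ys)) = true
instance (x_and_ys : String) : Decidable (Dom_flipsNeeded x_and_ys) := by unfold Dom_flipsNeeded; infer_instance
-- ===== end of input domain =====

-- B replaces A's interleaved two-pointer while loop with two half-slice counts (simpler; measured faster by constant factor via C-level str.count).

-- ===== PORT A =====
-- the while loop: state (x, y, flips), one recursive call per iteration
def flipsLoopA (cs : List Char) (x y flips : Int) : Int :=
  if x < y then
    let flips := if PySem.List.pyGet? cs x = some 'y' then flips + 1 else flips
    let flips := if PySem.List.pyGet? cs y = some 'x' then flips + 1 else flips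
    flipsLoopA cs (x + 1) (y - 1) flips
  else flips
termination_by (y - x).toNat
decreasing_by omega

def flipsNeeded (x_and_ys : String) : Int :=
  flipsLoopA x_and_ys.toList 0 ((x_and_ys.toList.length : Int) - 1) 0

-- ===== PORT B =====
def flipsNeeded_alt (x_and_ys : String) : Int :=
  let cs := x_and_ys.toList
  let n : Int := cs.length
  ((PySem.List.slice cs none (some (PySem.Int.floordiv n 2))).count 'y' : Int)
    + ((PySem.List.slice cs (some (PySem.Int.floordiv (n + 1) 2)) none).count 'x' : Int)

-- ===== PRECONDITION & SPEC =====
def Spec_flipsNeeded (x_and_ys : String) (out : Int) : Prop := out = flipsNeeded_alt x_and_ys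
instance (x_and_ys : String) (out : Int) : Decidable (Spec_flipsNeeded x_and_ys out) := by unfold Spec_flipsNeeded; infer_instance

-- ===== CLAIM (what is proved, stated in full; the proofs are below) =====
def Claim_equal_flipsNeeded : Prop := ∀ (x_and_ys : String), Dom_flipsNeeded x_and_ys → Spec_flipsNeeded x_and_ys (flipsNeeded x_and_ys)

-- ===== LEMMAS AND PROOFS =====

-- loop invariant: from position x (with mirror index n-1-x), the loop adds the
-- 'y'-count of indices [x, n/2) and the 'x'-count of indices [(n+1)/2, n-x)
theorem flipsLoopA_eq (cs : List Char) (x : Nat) (flips : Int)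
    (hx : x ≤ cs.length / 2) :
    flipsLoopA cs x ((cs.length : Int) - 1 - x) flips
      = flips + (((cs.drop x).take (cs.length / 2 - x)).count 'y' : Int)
        + (((cs.take (cs.length - x)).drop ((cs.length + 1) / 2)).count 'x' : Int) := by
  set n := cs.length with hn
  induction hk : n / 2 - x generalizing x flips with
  | zero =>
    rw [flipsLoopA]
    have hcond : ¬ ((x : Int) < (n : Int) - 1 - x) := by omega
    rw [if_neg hcond]
    have h1 : n / 2 - x = 0 := hk
    have h2 : (cs.take (n - x)).drop ((n + 1) / 2) = [] := by
      apply List.drop_eq_nil_of_le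
      simp only [List.length_take]
      omega
    simp [h2]
  | succ k ih =>
    have hxn : x < n := by omega
    have hyn : n - 1 - x < n := by omega
    rw [flipsLoopA]
    have hcond : ((x : Int) < (n : Int) - 1 - x) := by omega
    rw [if_pos hcond]
    have hgx : PySem.List.pyGet? cs (x : Int) = some cs[x] := by
      simpa using PySem.List.pyGet?_natCast (xs := cs) (n := x) (by omega)
    have hgy : PySem.List.pyGet? cs ((n : Int) - 1 - x) = some (cs[n - (x + 1)]'(by omega)) := by
      have : ((n : Int) - 1 - x) = ((n - (x + 1) : Nat) : Int) := by omega
      rw [this]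
      simpa using PySem.List.pyGet?_natCast (xs := cs) (n := n - (x + 1)) (by omega)
    rw [hgx, hgy]
    have harg : ((x : Int) + 1) = ((x + 1 : Nat) : Int) := by push_cast; ring
    have harg2 : ((n : Int) - 1 - x - 1) = ((n : Int) - 1 - ((x + 1 : Nat) : Int)) := by
      push_cast; ring
    rw [harg2, harg,
      ih (x + 1) _ (by omega) (by omega)]
    -- left segment: (drop x).take (n/2 - x) = cs[x] :: (drop (x+1)).take (n/2 - x - 1)
    have hleft : (cs.drop x).take (n / 2 - x)
        = cs[x] :: (cs.drop (x + 1)).take (n / 2 - (x + 1)) := by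
      rw [List.drop_eq_getElem_cons hxn]
      have : n / 2 - x = (n / 2 - (x + 1)) + 1 := by omega
      rw [this, List.take_succ_cons]
    -- right segment: (take (n - x)).drop m = (take (n - (x+1))).drop m ++ [cs[n-1-x]]
    have hright : (cs.take (n - x)).drop ((n + 1) / 2)
        = (cs.take (n - (x + 1))).drop ((n + 1) / 2) ++ [cs[n - (x + 1)]'(by omega)] := by
      have h1 : n - x = (n - (x + 1)) + 1 := by omega
      have h2 : cs.take ((n - (x + 1)) + 1)
          = cs.take (n - (x + 1)) ++ [cs[n - (x + 1)]] := by
        rw [List.take_add_one, List.getElem?_eq_getElem (by omega)]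
        rfl
      have h3 : (n + 1) / 2 ≤ (cs.take (n - (x + 1))).length := by
        simp only [List.length_take]
        omega
      rw [h1, h2, List.drop_append_of_le_length h3]
    have e2 : n / 2 - (x + 1) = k := by omega
    rw [hk] at hleft
    rw [e2] at hleft
    rw [hleft, hright]
    simp only [List.count_cons, List.count_append, List.count_singleton, List.count_nil,
      Option.some.injEq, beq_iff_eq]
    push_cast
    split_ifs <;> omega

theorem flipsNeeded_eq_alt (s : String) : flipsNeeded s = flipsNeeded_alt s := by
  unfold flipsNeeded flipsNeeded_alt
  set cs := s.toList with hcs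
  have h0 : ((0 : Int)) = ((0 : Nat) : Int) := by norm_num
  have := flipsLoopA_eq cs 0 0 (by omega)
  simp only [Nat.cast_zero, Int.sub_zero, List.drop_zero, Nat.sub_zero] at this ⊢
  rw [this]
  have hd1 : PySem.Int.floordiv (cs.length : Int) 2 = ((cs.length / 2 : Nat) : Int) := by
    exact_mod_cast PySem.Int.floordiv_natCast cs.length 2
  have hd2 : PySem.Int.floordiv ((cs.length : Int) + 1) 2 = (((cs.length + 1) / 2 : Nat) : Int) := by
    have : ((cs.length : Int) + 1) = ((cs.length + 1 : Nat) : Int) := by push_cast; ring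
    rw [this]
    exact_mod_cast PySem.Int.floordiv_natCast (cs.length + 1) 2
  rw [hd1, hd2, PySem.List.slice_to_natCast, PySem.List.slice_from_natCast]
  simp

-- ===== VERDICT (by name: the statement is the Claim_ definition above) =====
theorem flipsNeeded_spec : Claim_equal_flipsNeeded := by
  intro s _
  exact flipsNeeded_eq_alt s
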